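-- pv_equiv track=rewrite | github.com/damarisarmoa12/Intro | parcialpython.py | pos_umbral
-- ===== SOURCE A (Python) =====
-- def pos_umbral (s : list[int], u : int) -> int:
--    i = 0
--    res = 0
--
--    while i < len(s):
--       elemento = s[i]
--       if elemento > u:
--          res = -1
--       else:
--          res = s[i]
--       i += 1
--    return res
-- ===== SOURCE B (Python) =====
-- def pos_umbral(s, u):
--     if not s:
--         return 0
--     return -1 if s[-1] > u else s[-1]
-- ===== Notes on version B (the rewrite author's own statement) =====
-- stated objective: simpler
-- what changed: Replaces the whole-list loop by a closed form: only the last iteration determines A's result, so B inspects just the last element (0 for the empty list).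
import Mathlib
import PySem

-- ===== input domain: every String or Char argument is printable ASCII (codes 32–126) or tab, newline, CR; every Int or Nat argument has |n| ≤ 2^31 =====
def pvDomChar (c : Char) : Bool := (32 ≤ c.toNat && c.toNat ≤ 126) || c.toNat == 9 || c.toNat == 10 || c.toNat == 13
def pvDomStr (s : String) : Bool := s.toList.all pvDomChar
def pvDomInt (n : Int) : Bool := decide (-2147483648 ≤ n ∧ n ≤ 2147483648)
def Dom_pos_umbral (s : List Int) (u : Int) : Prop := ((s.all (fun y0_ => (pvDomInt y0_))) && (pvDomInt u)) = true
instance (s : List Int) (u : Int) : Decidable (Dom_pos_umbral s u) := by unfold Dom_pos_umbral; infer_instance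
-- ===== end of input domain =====

-- ===== PORT A =====
-- B changes only the means: A's loop visits every element; B reads only the last one.
-- the while loop over i, carrying res; transliterated as a fold over the elements in order
def pos_umbral (s : List Int) (u : Int) : Int :=
  s.foldl (fun _res elemento => if elemento > u then -1 else elemento) 0

-- ===== PORT B =====
def pos_umbral_alt (s : List Int) (u : Int) : Int :=
  match s.getLast? with
  | none => 0
  | some x => if x > u then -1 else x

-- ===== PRECONDITION & SPEC =====
def Spec_pos_umbral (s : List Int) (u : Int) (out : Int) : Prop := out = pos_umbral_alt s u
instance (s : List Int) (u : Int) (out : Int) : Decidable (Spec_pos_umbral s u out) := by unfold Spec_pos_umbral; infer_instance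

-- ===== CLAIM (what is proved, stated in full; the proofs are below) =====
def Claim_equal_pos_umbral : Prop := ∀ (s : List Int) (u : Int), Dom_pos_umbral s u → Spec_pos_umbral s u (pos_umbral s u)

-- ===== LEMMAS AND PROOFS =====
-- The fold's result depends only on the last element: whatever the accumulator, the last step overwrites it.
theorem pos_umbral_foldl_last (u : Int) (s : List Int) (a : Int) :
    s.foldl (fun _res elemento => if elemento > u then -1 else elemento) a =
    (match s.getLast? with
     | none => a
     | some x => if x > u then -1 else x) := by
  induction s generalizing a with
  | nil => rfl
  | cons y ys ih =>
    simp only [List.foldl_cons, ih]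
    cases h : ys.getLast? with
    | none =>
      have : ys = [] := List.getLast?_eq_none_iff.mp h
      subst this; rfl
    | some x =>
      cases ys with
      | nil => simp at h
      | cons z zs => simp [List.getLast?_cons_cons] at h ⊢; simp [h]

-- ===== VERDICT (by name: the statement is the Claim_ definition above) =====
theorem pos_umbral_spec : Claim_equal_pos_umbral := by
  intro s u _
  unfold Spec_pos_umbral pos_umbral pos_umbral_alt
  exact pos_umbral_foldl_last u s 0
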